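-- pv_equiv track=rewrite | github.com/cathedralpkg/Pilgrim | src/modpilgrim/PathVars.py | string_of_atoms
-- ===== SOURCE A (Python) =====
-- def string_of_atoms(latoms):
--     string = ""
--     # sort and correct to start at position 1
--     latoms.sort()
--     latoms = [at+1 for at in latoms]
--     # generate string
--     ii     = 0
--     at0    = latoms[0]
--     string = "%i"%at0
--     for idx,at in enumerate(latoms):
--         if idx == 0: continue
--         if at == at0+1:
--            ii   = 1
--            if idx+1 == len(latoms): string += "-%s"%at
--         elif ii == 0:
--            string += " %s"%at
--         else:
--            string += "-%s %s"%(latoms[idx-1],at)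
--            ii = 0
--         at0  = at
--     return string
-- ===== SOURCE B (Python) =====
-- def string_of_atoms(latoms):
--     # runs-then-format decomposition; sorts latoms in place like the original
--     latoms.sort()
--     shifted = [at + 1 for at in latoms]
--     start = shifted[0]
--     prev = start
--     runs = []
--     for at in shifted[1:]:
--         if at == prev + 1:
--             prev = at
--         else:
--             runs.append((start, prev))
--             start = at
--             prev = at
--     runs.append((start, prev))
--     return " ".join("%i" % s if s == e else "%i-%i" % (s, e) for s, e in runs)
-- ===== Notes on version B (the rewrite author's own statement) =====
-- stated objective: simpler
-- what changed: Replaced A's single-pass index/flag (ii, at0, enumerate, latoms[idx-1], last-index test) state machine that builds the string piecemeal by a two-stage decomposition: group the shifted sorted values into (start, end) runs (a run extends only while the next value is prev+1), then format each run and ' '.join the pieces.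
import Mathlib
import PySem

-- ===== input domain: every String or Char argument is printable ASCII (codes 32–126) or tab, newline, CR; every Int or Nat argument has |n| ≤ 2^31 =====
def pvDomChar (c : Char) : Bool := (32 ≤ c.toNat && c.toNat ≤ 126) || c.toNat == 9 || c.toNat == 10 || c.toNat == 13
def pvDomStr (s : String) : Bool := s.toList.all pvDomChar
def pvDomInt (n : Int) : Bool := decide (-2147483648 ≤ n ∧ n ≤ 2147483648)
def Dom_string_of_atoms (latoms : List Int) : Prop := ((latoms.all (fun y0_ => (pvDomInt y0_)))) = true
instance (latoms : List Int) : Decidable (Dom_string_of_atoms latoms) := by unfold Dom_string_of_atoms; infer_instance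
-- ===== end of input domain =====

-- B replaces A's index/flag single-pass state machine by a two-stage runs-then-format
-- decomposition (objective: simpler). Both A and B sort the argument list in place in
-- Python; the equivalence proved here is about the return value.

-- ===== PORT A =====
-- the body of A's for-loop (state = (string, ii, at0), element = (idx, at))
def pvStepA (l : List Int) (st : String × Int × Int) (p : Int × Int) : String × Int × Int :=
  let string := st.1; let ii := st.2.1; let at0 := st.2.2
  let idx := p.1; let at_ := p.2
  if idx = 0 then st
  else if at_ = at0 + 1 then
    ((if idx + 1 = (l.length : Int) then string ++ "-" ++ PySem.Int.toStr at_ else string), 1, at_)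
  else if ii = 0 then
    (string ++ " " ++ PySem.Int.toStr at_, ii, at_)
  else
    (string ++ "-" ++ PySem.Int.toStr (PySem.List.pyGetD l (idx - 1) 0) ++ " " ++ PySem.Int.toStr at_, 0, at_)

-- literal transliteration of A: sort, shift by 1, then the enumerate loop with state (string, ii, at0)
def string_of_atoms (latoms : List Int) : String :=
  let l := (PySem.List.sorted latoms (fun x => x) false).map (fun a => a + 1)
  match PySem.List.pyGet? l 0 with
  | none => ""   -- latoms[0] raises IndexError on the empty list; excluded by Pre_
  | some a0 =>
    ((PySem.List.enumerate l 0).foldl (pvStepA l) (PySem.Int.toStr a0, 0, a0)).1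

-- ===== PORT B =====
-- literal transliteration of B: group shifted values into (start, end) runs, then format and join
def string_of_atoms_alt (latoms : List Int) : String :=
  let shifted := (PySem.List.sorted latoms (fun x => x) false).map (fun a => a + 1)
  match shifted with
  | [] => ""   -- shifted[0] raises IndexError on the empty list; excluded by Pre_
  | start :: rest =>
    let st := rest.foldl
      (fun (st : List (Int × Int) × Int × Int) at_ =>
        if at_ = st.2.2 + 1 then (st.1, st.2.1, at_)
        else (st.1 ++ [(st.2.1, st.2.2)], at_, at_))
      ([], start, start)
    PySem.Str.join " " ((st.1 ++ [(st.2.1, st.2.2)]).map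
      (fun p => if p.1 = p.2 then PySem.Int.toStr p.1
                else PySem.Int.toStr p.1 ++ "-" ++ PySem.Int.toStr p.2))

-- ===== PRECONDITION & SPEC =====
-- A raises IndexError (latoms[0]) on the empty list; Pre_ excludes exactly that input.
def Pre_string_of_atoms (latoms : List Int) : Prop := latoms ≠ []
instance (latoms : List Int) : Decidable (Pre_string_of_atoms latoms) := by unfold Pre_string_of_atoms; infer_instance
def pvWitness_string_of_atoms : List Int := [3, 1, 0, 1]

def Spec_string_of_atoms (latoms : List Int) (out : String) : Prop := out = string_of_atoms_alt latoms
instance (latoms : List Int) (out : String) : Decidable (Spec_string_of_atoms latoms out) := by unfold Spec_string_of_atoms; infer_instance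

-- ===== CLAIM (what is proved, stated in full; the proofs are below) =====
def Claim_equal_string_of_atoms : Prop := ∀ (latoms : List Int), Dom_string_of_atoms latoms → Pre_string_of_atoms latoms → Spec_string_of_atoms latoms (string_of_atoms latoms)

-- ===== LEMMAS AND PROOFS =====

-- the runs of B, as a structural recursion (proof-side model of B's foldl)
def pvRuns (start prev : Int) : List Int → List (Int × Int)
  | [] => [(start, prev)]
  | x :: xs => if x = prev + 1 then pvRuns start x xs else (start, prev) :: pvRuns x x xs

-- the suffix of A's string after the first "%i"%at0, as a structural recursion
def pvTail (ii : Bool) (prev : Int) : List Int → String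
  | [] => ""
  | x :: xs =>
    if x = prev + 1 then
      (if xs = [] then "-" ++ PySem.Int.toStr x else pvTail true x xs)
    else
      (if ii then "-" ++ PySem.Int.toStr prev else "") ++ " " ++ PySem.Int.toStr x ++ pvTail false x xs

def pvFmt (p : Int × Int) : String :=
  if p.1 = p.2 then PySem.Int.toStr p.1 else PySem.Int.toStr p.1 ++ "-" ++ PySem.Int.toStr p.2

lemma pvJoin_cons_cons (p q : String) (qs : List String) :
    PySem.Str.join " " (p :: q :: qs) = p ++ " " ++ PySem.Str.join " " (q :: qs) := by
  simp only [PySem.Str.join, List.map_cons]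
  rw [show (" " : String).toList = [' '] from rfl, PySem.Chars.join_cons_cons]
  rw [String.ofList_append, String.ofList_append, String.ofList_toList]

lemma pvJoin_singleton (p : String) : PySem.Str.join " " [p] = p := by
  simp [PySem.Str.join]

lemma pvRuns_ne_nil (s p : Int) (xs : List Int) : pvRuns s p xs ≠ [] := by
  induction xs generalizing s p with
  | nil => simp [pvRuns]
  | cons x xs ih => simp only [pvRuns]; split <;> simp [ih]

-- B's foldl accumulates exactly pvRuns
lemma pvFoldB (xs : List Int) (acc : List (Int × Int)) (s p : Int) :
    (xs.foldl
      (fun (st : List (Int × Int) × Int × Int) at_ =>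
        if at_ = st.2.2 + 1 then (st.1, st.2.1, at_)
        else (st.1 ++ [(st.2.1, st.2.2)], at_, at_)) (acc, s, p)).1
    ++ [((xs.foldl
      (fun (st : List (Int × Int) × Int × Int) at_ =>
        if at_ = st.2.2 + 1 then (st.1, st.2.1, at_)
        else (st.1 ++ [(st.2.1, st.2.2)], at_, at_)) (acc, s, p)).2.1,
        (xs.foldl
      (fun (st : List (Int × Int) × Int × Int) at_ =>
        if at_ = st.2.2 + 1 then (st.1, st.2.1, at_)
        else (st.1 ++ [(st.2.1, st.2.2)], at_, at_)) (acc, s, p)).2.2)]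
    = acc ++ pvRuns s p xs := by
  induction xs generalizing acc s p with
  | nil => simp [pvRuns]
  | cons x xs ih =>
    simp only [List.foldl_cons, pvRuns]
    by_cases h : x = p + 1
    · simp [h, ih]
    · simp [h, ih, List.append_assoc]

-- joined formatted runs = head piece ++ pvTail  (mutual statement for the two flag states)
lemma pvJoinRuns (xs : List Int) :
    (∀ prev, PySem.Str.join " " ((pvRuns prev prev xs).map pvFmt)
        = PySem.Int.toStr prev ++ pvTail false prev xs) ∧
    (∀ start prev, start < prev → xs ≠ [] →
      PySem.Str.join " " ((pvRuns start prev xs).map pvFmt)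
        = PySem.Int.toStr start ++ pvTail true prev xs) := by
  induction xs with
  | nil =>
    refine ⟨fun prev => ?_, fun start prev h hne => absurd rfl hne⟩
    simp [pvRuns, pvTail, pvFmt, pvJoin_singleton, String.append_empty]
  | cons x xs ih =>
    constructor
    · intro prev
      by_cases h : x = prev + 1
      · subst h
        rcases List.eq_nil_or_concat' xs with hnil | _
        · subst hnil
          simp [pvRuns, pvTail, pvFmt, pvJoin_singleton]
          rw [String.append_assoc]
        · have hne : xs ≠ [] := by rintro rfl; simp_all
          simp only [pvRuns, pvTail, if_neg hne]
          exact ih.2 prev (prev + 1) (by omega) hne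
      · simp only [pvRuns, pvTail, if_neg h, List.map_cons]
        rw [show pvFmt (prev, prev) = PySem.Int.toStr prev from by simp [pvFmt]]
        have hrne := pvRuns_ne_nil x x xs
        obtain ⟨r, rs, hr⟩ := List.exists_cons_of_ne_nil hrne
        rw [hr, List.map_cons, pvJoin_cons_cons, ← List.map_cons, ← hr, ih.1 x]
        simp [String.append_assoc, String.empty_append]
    · intro start prev hlt hne
      by_cases h : x = prev + 1
      · subst h
        rcases List.eq_nil_or_concat' xs with hnil | _
        · subst hnil
          rw [show pvRuns start prev [prev + 1] = [(start, prev + 1)] from by simp [pvRuns],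
            List.map_singleton, pvJoin_singleton]
          simp [pvTail, pvFmt, show ¬ (start = prev + 1) from by omega]
          rw [String.append_assoc]
        · have hxs : xs ≠ [] := by rintro rfl; simp_all
          simp only [pvRuns, pvTail, if_neg hxs]
          exact ih.2 start (prev + 1) (by omega) hxs
      · simp only [pvRuns, pvTail, if_neg h, List.map_cons]
        rw [show pvFmt (start, prev) = PySem.Int.toStr start ++ "-" ++ PySem.Int.toStr prev from by
          simp only [pvFmt, if_neg (by omega : ¬ (start = prev))]]
        have hrne := pvRuns_ne_nil x x xs
        obtain ⟨r, rs, hr⟩ := List.exists_cons_of_ne_nil hrne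
        rw [hr, List.map_cons, pvJoin_cons_cons, ← List.map_cons, ← hr, ih.1 x]
        simp [String.append_assoc]

-- A's loop over the enumerate suffix computes pvTail
lemma pvFoldA (l : List Int) (xs : List Int) :
    ∀ (k : Int) (s : String) (ii : Int) (b : Bool) (at0 : Int),
      1 ≤ k → l.drop k.toNat = xs → PySem.List.pyGetD l (k - 1) 0 = at0 →
      ii = (if b then 1 else 0) →
      ((PySem.List.enumerate xs k).foldl (pvStepA l) (s, ii, at0)).1 = s ++ pvTail b at0 xs := by
  induction xs with
  | nil =>
    intro k s ii b at0 hk hdrop hprev hii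
    simp [PySem.List.enumerate, pvTail, String.append_empty]
  | cons x xs ih =>
    intro k s ii b at0 hk hdrop hprev hii
    have hk0 : ¬ (k = 0) := by omega
    have hlen : l.length = k.toNat + 1 + xs.length := by
      have := congrArg List.length hdrop
      simp [List.length_drop] at this
      omega
    have hklt : k.toNat < l.length := by omega
    have hdrop' : l.drop (k + 1).toNat = xs := by
      have h1 : (k + 1).toNat = k.toNat + 1 := by omega
      rw [h1, ← List.drop_drop, hdrop]; rfl
    have hgetk : PySem.List.pyGetD l k 0 = x := by
      rw [PySem.List.pyGetD_of_nonneg l 0 (by omega : (0:Int) ≤ k)]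
      rw [List.getD_eq_getElem l 0 hklt]
      have h0 : (l.drop k.toNat)[0]'(by rw [hdrop]; simp) = x := by simp [hdrop]
      rw [← h0]; simp [List.getElem_drop]
    have hget : PySem.List.pyGetD l (k + 1 - 1) 0 = x := by
      rw [show k + 1 - 1 = k from by ring]; exact hgetk
    rw [PySem.List.enumerate_cons, List.foldl_cons]
    by_cases h : x = at0 + 1
    · by_cases hlast : xs = []
      · subst hlast
        have hl : k + 1 = (l.length : Int) := by
          simp at hlen; omega
        rw [show pvStepA l (s, ii, at0) (k, x) = (s ++ "-" ++ PySem.Int.toStr x, 1, x) from by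
          simp [pvStepA, hk0, h, hl]]
        simp only [PySem.List.enumerate, List.foldl_nil]
        simp [pvTail, if_pos h, String.append_assoc]
      · have hl : ¬ (k + 1 = (l.length : Int)) := by
          have : xs.length ≠ 0 := by simpa using hlast
          omega
        rw [show pvStepA l (s, ii, at0) (k, x) = (s, 1, x) from by
          simp [pvStepA, hk0, h, hl]]
        rw [ih (k + 1) s 1 true x (by omega) hdrop' hget rfl]
        simp [pvTail, if_pos h, if_neg hlast]
    · cases b with
      | false =>
        subst hii
        rw [show pvStepA l (s, (if false then 1 else 0 : Int), at0) (k, x)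
            = (s ++ " " ++ PySem.Int.toStr x, 0, x) from by
          simp [pvStepA, hk0, h]]
        rw [ih (k + 1) (s ++ " " ++ PySem.Int.toStr x) 0 false x (by omega) hdrop' hget rfl]
        simp [pvTail, if_neg h, String.append_assoc, String.empty_append]
      | true =>
        subst hii
        rw [show pvStepA l (s, (if true then 1 else 0 : Int), at0) (k, x)
            = (s ++ "-" ++ PySem.Int.toStr at0 ++ " " ++ PySem.Int.toStr x, 0, x) from by
          simp [pvStepA, hk0, h, hprev]]
        rw [ih (k + 1) (s ++ "-" ++ PySem.Int.toStr at0 ++ " " ++ PySem.Int.toStr x) 0 false x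
          (by omega) hdrop' hget rfl]
        simp [pvTail, if_neg h, String.append_assoc]

-- ===== VERDICT (by name: the statement is the Claim_ definition above) =====
theorem string_of_atoms_spec : Claim_equal_string_of_atoms := by
  intro latoms _ hpre
  unfold Spec_string_of_atoms string_of_atoms string_of_atoms_alt
  have hsne : (PySem.List.sorted latoms (fun x => x) false).map (fun a => a + 1) ≠ [] := by
    simp only [ne_eq, List.map_eq_nil_iff, PySem.List.sorted_eq_nil_iff]
    exact hpre
  obtain ⟨a0, rest, hl⟩ := List.exists_cons_of_ne_nil hsne
  rw [hl]
  -- A side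
  have hget0 : PySem.List.pyGet? (a0 :: rest) (0 : Int) = some a0 := by
    simp [PySem.List.pyGet?, PySem.List.pyIdx?]
  simp only [hget0]
  rw [PySem.List.enumerate_cons, List.foldl_cons]
  rw [show pvStepA (a0 :: rest) (PySem.Int.toStr a0, 0, a0) (0, a0)
      = (PySem.Int.toStr a0, 0, a0) from by simp [pvStepA]]
  rw [show (0 : Int) + 1 = 1 from rfl]
  rw [pvFoldA (a0 :: rest) rest 1 (PySem.Int.toStr a0) 0 false a0 (by omega) (by simp)
    (by simp [PySem.List.pyGetD_of_nonneg]) rfl]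
  -- B side
  have hB := pvFoldB rest [] a0 a0
  set st := rest.foldl
      (fun (st : List (Int × Int) × Int × Int) at_ =>
        if at_ = st.2.2 + 1 then (st.1, st.2.1, at_)
        else (st.1 ++ [(st.2.1, st.2.2)], at_, at_))
      ([], a0, a0) with hst
  rw [show (fun (p : Int × Int) => if p.1 = p.2 then PySem.Int.toStr p.1
      else PySem.Int.toStr p.1 ++ "-" ++ PySem.Int.toStr p.2) = pvFmt from rfl]
  rw [show st.1 ++ [(st.2.1, st.2.2)] = pvRuns a0 a0 rest from by
    rw [hB, List.nil_append]]
  rw [(pvJoinRuns rest).1 a0]
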